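-- pv_equiv track=rewrite | github.com/mariogemoll/adventofcode2024 | 22/twenty_two.py | price_seq
-- ===== SOURCE A (Python) =====
-- def secret_number(input):
--     mul_result = input * 64
--     result = input ^ mul_result
--     result = result % 16777216
--
--     div_result = int(result / 32)
--     result = result ^ div_result
--     result = result % 16777216
--
--     mul_result = result * 2048
--     result = result ^ mul_result
--     result = result % 16777216
--     return result
--
-- def price_seq(x, num_iterations):
--     price = x % 10
--     prev_price = price
--     result = [(price, None)]
--     for _ in range(num_iterations):
--         x = secret_number(x)
--         price = x % 10
--         result.append((price, price - prev_price))
--         prev_price = price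
--     return result
-- ===== SOURCE B (Python) =====
-- def secret_number(input):
--     mul_result = input * 64
--     result = input ^ mul_result
--     result = result % 16777216
--
--     div_result = int(result / 32)
--     result = result ^ div_result
--     result = result % 16777216
--
--     mul_result = result * 2048
--     result = result ^ mul_result
--     result = result % 16777216
--     return result
--
-- def price_seq(x, num_iterations):
--     # pass 1: build the list of prices
--     prices = [x % 10]
--     for _ in range(num_iterations):
--         x = secret_number(x)
--         prices.append(x % 10)
--     # pass 2: pair each price (after the first) with its difference from the previous one
--     return [(prices[0], None)] + [(b, b - a) for a, b in zip(prices, prices[1:])]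
-- ===== Notes on version B (the rewrite author's own statement) =====
-- stated objective: alternative
-- what changed: A fuses generation and differencing in one loop with prev_price state and an accumulating result list; B does two separate passes: first builds the plain list of prices by iterating the recurrence, then produces the output by zipping the price list with its own tail.
import Mathlib
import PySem

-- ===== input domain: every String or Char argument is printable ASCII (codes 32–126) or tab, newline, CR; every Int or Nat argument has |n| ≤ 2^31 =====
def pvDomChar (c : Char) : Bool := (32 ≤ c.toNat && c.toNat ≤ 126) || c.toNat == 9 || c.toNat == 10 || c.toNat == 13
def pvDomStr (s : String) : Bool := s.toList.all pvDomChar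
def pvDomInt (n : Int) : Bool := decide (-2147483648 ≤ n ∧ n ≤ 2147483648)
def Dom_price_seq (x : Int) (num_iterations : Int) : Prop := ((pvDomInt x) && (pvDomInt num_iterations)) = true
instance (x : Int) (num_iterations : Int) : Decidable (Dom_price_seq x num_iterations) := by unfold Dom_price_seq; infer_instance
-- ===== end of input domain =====

-- B replaces A's single fused loop (carrying prev_price and the growing result list)
-- by two passes: generate the plain price list, then zip it with its tail for the diffs.

-- ===== PORT A =====
def secret_number (input : Int) : Int :=
  let mul_result := input * 64
  let result := PySem.Int.bxor input mul_result
  let result := PySem.Int.mod result 16777216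
  -- int(result / 32): result is a nonnegative int < 2^24 here, so the float division
  -- is exact and int() truncation equals floor division.
  let div_result := PySem.Int.floordiv result 32
  let result := PySem.Int.bxor result div_result
  let result := PySem.Int.mod result 16777216
  let mul_result := result * 2048
  let result := PySem.Int.bxor result mul_result
  PySem.Int.mod result 16777216

def priceSeqLoopA : Nat → Int → Int → List (Int × Option Int) → List (Int × Option Int)
  | 0, _, _, result => result
  | k + 1, x, prev_price, result =>
    let x' := secret_number x
    let price := PySem.Int.mod x' 10
    priceSeqLoopA k x' price (result ++ [(price, some (price - prev_price))])

def price_seq (x : Int) (num_iterations : Int) : List (Int × Option Int) :=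
  let price := PySem.Int.mod x 10
  priceSeqLoopA num_iterations.toNat x price [(price, none)]

-- ===== PORT B =====
-- pass 1: the prices after the first (prices[1:])
def pricesTail : Nat → Int → List Int
  | 0, _ => []
  | k + 1, x =>
    let x' := secret_number x
    PySem.Int.mod x' 10 :: pricesTail k x'

def price_seq_alt (x : Int) (num_iterations : Int) : List (Int × Option Int) :=
  let p0 := PySem.Int.mod x 10
  let prices := p0 :: pricesTail num_iterations.toNat x
  -- pass 2: head pair, then (b, b - a) for (a, b) in zip(prices, prices[1:])
  (p0, none) :: (List.zip prices prices.tail).map (fun ab => (ab.2, some (ab.2 - ab.1)))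

-- ===== PRECONDITION & SPEC =====
def Spec_price_seq (x : Int) (num_iterations : Int) (out : List (Int × Option Int)) : Prop := out = price_seq_alt x num_iterations
instance (x : Int) (num_iterations : Int) (out : List (Int × Option Int)) : Decidable (Spec_price_seq x num_iterations out) := by unfold Spec_price_seq; infer_instance

-- ===== CLAIM (what is proved, stated in full; the proofs are below) =====
def Claim_equal_price_seq : Prop := ∀ (x : Int) (num_iterations : Int), Dom_price_seq x num_iterations → Spec_price_seq x num_iterations (price_seq x num_iterations)

-- ===== LEMMAS AND PROOFS =====
theorem priceSeqLoopA_eq (k : Nat) : ∀ (x prev : Int) (acc : List (Int × Option Int)),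
    priceSeqLoopA k x prev acc =
      acc ++ (List.zip (prev :: pricesTail k x) (pricesTail k x)).map
        (fun ab => (ab.2, some (ab.2 - ab.1))) := by
  induction k with
  | zero => intro x prev acc; simp [priceSeqLoopA, pricesTail]
  | succ k ih =>
    intro x prev acc
    simp only [priceSeqLoopA, pricesTail, ih, List.zip_cons_cons, List.map_cons,
      List.append_assoc, List.cons_append, List.nil_append]

-- ===== VERDICT (by name: the statement is the Claim_ definition above) =====
theorem price_seq_spec : Claim_equal_price_seq := by
  intro x n _
  show _ = _
  simp [price_seq, price_seq_alt, priceSeqLoopA_eq]
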